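-- pv_equiv track=rewrite | github.com/vibhaalbus14/DSA | 357.putMarblesInABag.py | putMarbles
-- ===== SOURCE A (Python) =====
-- from typing import List
--
-- def putMarbles(weights: List[int], k: int) -> int:
--     n=len(weights)
--     if n==k or k==1:
--         return 0
--
--     #for 1 bag=> 2 marbles need to be picked
--     #for 2 bags, 4 marbles need to be picked
--     #for k bags, 2*k marbles need to be picked
--     #=> k bags need k pairs of marbles
--     #the first and last marbles are always present in the bag both in min score and max score
--
--     needed=k-1
--     initialSum=weights[0]+weights[-1]
--     minScore,maxScore=initialSum,initialSum
--     #the rem marbles should be picked bw first and last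
--     #all the marrbles must be adjacent to each other
--     pairSumOfMarbles=[]
--     for i in range(n-1):
--         pairSumOfMarbles.append(weights[i]+weights[i+1])#choose adjacent pair of marbles
--         #why pair?
--         #each for one adjacent bags
--
--     #after picking all marbles, sort it out
--     #so that minimum sum causing pair is in min score and max in maxScore
--     pairSumOfMarbles.sort()
--
--     minScore+=sum(pairSumOfMarbles[:needed])
--     maxScore+=sum(pairSumOfMarbles[-(needed):])
--
--
--     return maxScore-minScore
-- ===== SOURCE B (Python) =====
-- from typing import List
--
-- def putMarbles(weights: List[int], k: int) -> int:
--     # Quickselect instead of sorting: the answer is (sum of the k-1 largest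
--     # adjacent pair sums) - (sum of the k-1 smallest ones); each sum is found
--     # by three-way-partition selection (average O(n)), with no sort at all.
--     pairs = [a + b for a, b in zip(weights, weights[1:])]
--     m = min(k - 1, len(pairs))
--     if m <= 0:
--         return 0
--     return _sum_largest(pairs, m) - _sum_smallest(pairs, m)
--
-- def _sum_smallest(l, t):
--     # sum of the t smallest elements of l (quickselect on the pivot l[len//2])
--     if t <= 0:
--         return 0
--     if len(l) <= t:
--         return sum(l)
--     p = l[len(l) // 2]
--     lt = [x for x in l if x < p]
--     eq = [x for x in l if x == p]
--     gt = [x for x in l if x > p]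
--     if t <= len(lt):
--         return _sum_smallest(lt, t)
--     if t <= len(lt) + len(eq):
--         return sum(lt) + p * (t - len(lt))
--     return sum(lt) + sum(eq) + _sum_smallest(gt, t - len(lt) - len(eq))
--
-- def _sum_largest(l, t):
--     # sum of the t largest elements of l
--     if t <= 0:
--         return 0
--     if len(l) <= t:
--         return sum(l)
--     p = l[len(l) // 2]
--     lt = [x for x in l if x < p]
--     eq = [x for x in l if x == p]
--     gt = [x for x in l if x > p]
--     if t <= len(gt):
--         return _sum_largest(gt, t)
--     if t <= len(gt) + len(eq):
--         return sum(gt) + p * (t - len(gt))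
--     return sum(gt) + sum(eq) + _sum_largest(lt, t - len(gt) - len(eq))
-- ===== Notes on version B (the rewrite author's own statement) =====
-- stated objective: alternative
-- what changed: B replaces A's sort-then-two-slice-sums with a sort-free quickselect: adjacent pair sums are three-way partitioned around a middle pivot and the sums of the k-1 smallest and k-1 largest are found by recursive selection (average O(n)), with the first/last-marble initialSum bookkeeping dropped because it cancels.
-- outside the precondition, e.g. on putMarbles([3, 1, 5], 0): A returns 2, B returns 0
import Mathlib
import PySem

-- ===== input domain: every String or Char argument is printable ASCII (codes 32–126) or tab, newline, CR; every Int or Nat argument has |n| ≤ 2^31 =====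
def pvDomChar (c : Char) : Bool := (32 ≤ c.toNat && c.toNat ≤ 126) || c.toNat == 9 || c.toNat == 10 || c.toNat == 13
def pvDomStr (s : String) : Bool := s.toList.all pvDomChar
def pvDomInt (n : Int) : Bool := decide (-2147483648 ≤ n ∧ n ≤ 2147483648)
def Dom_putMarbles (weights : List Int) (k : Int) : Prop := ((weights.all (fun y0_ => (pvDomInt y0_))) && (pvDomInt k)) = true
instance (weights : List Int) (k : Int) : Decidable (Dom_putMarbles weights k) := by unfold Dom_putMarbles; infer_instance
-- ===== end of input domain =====

-- B replaces A's sort + two slice sums by sort-free three-way-partition quickselect over the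
-- adjacent pair sums (objective: alternative; not claimed faster).

-- ===== PORT A =====
def putMarbles (weights : List Int) (k : Int) : Int :=
  let n : Int := weights.length
  if n == k || k == 1 then 0
  else
    let needed := k - 1
    -- weights[0] + weights[-1]; exact under Pre_ (weights ≠ [] here), Python raises IndexError on []
    let initialSum := PySem.List.pyGetD weights 0 0 + PySem.List.pyGetD weights (-1) 0
    let minScore := initialSum
    let maxScore := initialSum
    let pairSumOfMarbles : List Int :=
      (PySem.List.pyRange 0 (n - 1)).foldl
        (fun acc i => acc ++ [PySem.List.pyGetD weights i 0 + PySem.List.pyGetD weights (i + 1) 0]) []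
    let pairSumOfMarbles := PySem.List.sorted pairSumOfMarbles (fun x => x)
    let minScore := minScore + (PySem.List.slice pairSumOfMarbles none (some needed)).sum
    let maxScore := maxScore + (PySem.List.slice pairSumOfMarbles (some (-needed)) none).sum
    maxScore - minScore

-- ===== PORT B =====
-- sum of the t smallest elements of l, by three-way-partition quickselect
-- (fuel = |l| only makes the recursion structural; it never runs out: each call strictly shrinks l)
def sumSmallestF : Nat → List Int → Int → Int
  | 0, _, _ => 0
  | fuel + 1, l, t =>
    if t ≤ 0 then 0
    else if (l.length : Int) ≤ t then l.sum
    else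
      let p := PySem.List.pyGetD l (PySem.Int.floordiv (l.length : Int) 2) 0
      let lt := l.filter (fun x => decide (x < p))
      let eq := l.filter (fun x => x == p)
      let gt := l.filter (fun x => decide (p < x))
      if t ≤ (lt.length : Int) then sumSmallestF fuel lt t
      else if t ≤ (lt.length : Int) + (eq.length : Int) then lt.sum + p * (t - lt.length)
      else lt.sum + eq.sum + sumSmallestF fuel gt (t - lt.length - eq.length)

def sumSmallest (l : List Int) (t : Int) : Int := sumSmallestF l.length l t

-- sum of the t largest elements of l
def sumLargestF : Nat → List Int → Int → Int
  | 0, _, _ => 0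
  | fuel + 1, l, t =>
    if t ≤ 0 then 0
    else if (l.length : Int) ≤ t then l.sum
    else
      let p := PySem.List.pyGetD l (PySem.Int.floordiv (l.length : Int) 2) 0
      let lt := l.filter (fun x => decide (x < p))
      let eq := l.filter (fun x => x == p)
      let gt := l.filter (fun x => decide (p < x))
      if t ≤ (gt.length : Int) then sumLargestF fuel gt t
      else if t ≤ (gt.length : Int) + (eq.length : Int) then gt.sum + p * (t - gt.length)
      else gt.sum + eq.sum + sumLargestF fuel lt (t - gt.length - eq.length)

def sumLargest (l : List Int) (t : Int) : Int := sumLargestF l.length l t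

def putMarbles_alt (weights : List Int) (k : Int) : Int :=
  let pairs := (weights.zip (weights.drop 1)).map (fun p => p.1 + p.2)
  let m : Int := min (k - 1) (pairs.length : Int)
  if m ≤ 0 then 0
  else sumLargest pairs m - sumSmallest pairs m

-- ===== PRECONDITION & SPEC =====
-- Pre_ excludes the inputs where A raises IndexError (empty weights with k ≥ 2 or k < 0) and the
-- k ≤ 0 inputs with len(weights)+k > 2, where A's returned value is an accident of negative-slice
-- arithmetic (sums of pairs[:k-1] and pairs[1-k:]); k ≤ 0 inputs on which those slices are
-- provably empty (len(weights)+k ≤ 2, and [] with k = 0) remain inside and A = B = 0 there.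
def Pre_putMarbles (weights : List Int) (k : Int) : Prop :=
  (1 ≤ k ∧ (weights = [] → k = 1))
    ∨ (k ≤ 0 ∧ weights ≠ [] ∧ (weights.length : Int) + k ≤ 2)
    ∨ (weights = [] ∧ k = 0)
instance (weights : List Int) (k : Int) : Decidable (Pre_putMarbles weights k) := by unfold Pre_putMarbles; infer_instance
def pvWitness_putMarbles : List Int × Int := ([1, 3, 5, 1], 2)

def Spec_putMarbles (weights : List Int) (k : Int) (out : Int) : Prop := out = putMarbles_alt weights k
instance (weights : List Int) (k : Int) (out : Int) : Decidable (Spec_putMarbles weights k out) := by unfold Spec_putMarbles; infer_instance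

-- ===== CLAIM (what is proved, stated in full; the proofs are below) =====
def Claim_equal_putMarbles : Prop := ∀ (weights : List Int) (k : Int), Dom_putMarbles weights k → Pre_putMarbles weights k → Spec_putMarbles weights k (putMarbles weights k)

-- ===== LEMMAS AND PROOFS =====

-- adjacent pair sums: index form = zip form
theorem zipadj : ∀ (w : List Int),
    (List.range (w.length - 1)).map (fun j => w.getD j 0 + w.getD (j + 1) 0)
      = (w.zip (w.drop 1)).map (fun p => p.1 + p.2)
  | [] => by simp
  | [a] => by simp
  | a :: b :: t => by
      have ih := zipadj (b :: t)
      simp only [List.length_cons, Nat.add_sub_cancel, List.range_succ_eq_map, List.map_cons,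
        List.map_map, List.drop_succ_cons, List.drop_zero, List.zip_cons_cons] at *
      refine congrArg₂ _ (by simp) ?_
      simpa [Function.comp_def] using ih

-- A's pair-building loop equals the zip expression
theorem pairs_eq (w : List Int) :
    (PySem.List.pyRange 0 ((w.length : Int) - 1)).foldl
        (fun acc i => acc ++ [PySem.List.pyGetD w i 0 + PySem.List.pyGetD w (i + 1) 0]) []
      = (w.zip (w.drop 1)).map (fun p => p.1 + p.2) := by
  rw [PySem.List.foldl_append_singleton_eq_map, List.nil_append, PySem.List.pyRange_zero,
    List.map_map]
  have ht : ((w.length : Int) - 1).toNat = w.length - 1 := by omega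
  rw [ht, ← zipadj w]
  apply List.map_congr_left
  intro j hj
  simp only [Function.comp_apply]
  rw [show ((j : Nat) : Int) + 1 = ((j + 1 : Nat) : Int) from by push_cast; ring,
    PySem.List.pyGetD_natCast, PySem.List.pyGetD_natCast]

-- termination facts for the quickselect recursion: the pivot is in l, so the strict partitions shrink
theorem filter_lt_len (l : List Int) (p : Int) (hp : p ∈ l) :
    (l.filter (fun x => decide (x < p))).length < l.length := by
  rcases lt_or_eq_of_le (List.length_filter_le (fun x => decide (x < p)) l) with h | h
  · exact h
  · have := (List.length_filter_eq_length_iff).mp h p hp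
    simp at this

theorem filter_gt_len (l : List Int) (p : Int) (hp : p ∈ l) :
    (l.filter (fun x => decide (p < x))).length < l.length := by
  rcases lt_or_eq_of_le (List.length_filter_le (fun x => decide (p < x)) l) with h | h
  · exact h
  · have := (List.length_filter_eq_length_iff).mp h p hp
    simp at this

theorem pivot_mem (l : List Int) (h : l ≠ []) :
    PySem.List.pyGetD l (PySem.Int.floordiv (l.length : Int) 2) 0 ∈ l := by
  have h2 : PySem.Int.floordiv ((l.length : Nat) : Int) ((2 : Nat) : Int) = ((l.length / 2 : Nat) : Int) :=
    PySem.Int.floordiv_natCast l.length 2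
  have hlt : l.length / 2 < l.length := by
    have : 0 < l.length := List.length_pos_of_ne_nil h
    omega
  rw [show ((2 : Nat) : Int) = (2 : Int) from rfl] at h2
  rw [h2, PySem.List.pyGetD_natCast, List.getD_eq_getElem l 0 hlt]
  exact List.getElem_mem hlt


-- the sorted list is (sorted <-part) ++ (=-part) ++ (sorted >-part)
theorem sorted_partition (l : List Int) (p : Int) :
    PySem.List.sorted l (fun x => x)
      = PySem.List.sorted (l.filter (fun x => decide (x < p))) (fun x => x)
        ++ (l.filter (fun x => x == p)
          ++ PySem.List.sorted (l.filter (fun x => decide (p < x))) (fun x => x)) := by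
  set lt := l.filter (fun x => decide (x < p)) with hlt
  set eq := l.filter (fun x => x == p) with heq
  set gt := l.filter (fun x => decide (p < x)) with hgt
  have hmemlt : ∀ x ∈ PySem.List.sorted lt (fun x => x), x < p := by
    intro x hx
    have := (List.mem_filter.mp ((PySem.List.mem_sorted lt (fun x => x) false x).mp hx)).2
    simpa using this
  have hmemeq : ∀ x ∈ eq, x = p := by
    intro x hx
    have := (List.mem_filter.mp hx).2
    simpa using this
  have hmemgt : ∀ x ∈ PySem.List.sorted gt (fun x => x), p < x := by
    intro x hx
    have := (List.mem_filter.mp ((PySem.List.mem_sorted gt (fun x => x) false x).mp hx)).2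
    simpa using this
  apply PySem.List.sorted_id_eq_of_perm_of_pairwise
  · -- permutation
    have h1 : (lt ++ l.filter (fun x => !decide (x < p))).Perm l :=
      List.filter_append_perm _ l
    have h2 : ((l.filter (fun x => !decide (x < p))).filter (fun x => x == p)
        ++ (l.filter (fun x => !decide (x < p))).filter (fun x => !(x == p))).Perm
        (l.filter (fun x => !decide (x < p))) :=
      List.filter_append_perm _ _
    have e1 : (l.filter (fun x => !decide (x < p))).filter (fun x => x == p) = eq := by
      rw [List.filter_filter, heq]
      apply List.filter_congr
      intro x _
      by_cases hx : x = p
      · subst hx; simp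
      · simp [hx]
    have e2 : (l.filter (fun x => !decide (x < p))).filter (fun x => !(x == p)) = gt := by
      rw [List.filter_filter, hgt]
      apply List.filter_congr
      intro x _
      rcases lt_trichotomy x p with h | h | h
      · simp [h, not_lt.mpr (le_of_lt h)]
      · subst h; simp
      · simp [ne_of_gt h, not_lt.mpr (le_of_lt h), h]
    rw [e1, e2] at h2
    exact ((PySem.List.sorted_perm lt (fun x => x) false).append
      (List.Perm.append_left eq (PySem.List.sorted_perm gt (fun x => x) false))).trans
      ((List.Perm.append_left lt h2).trans h1)
  · -- pairwise ≤
    rw [List.pairwise_append]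
    refine ⟨PySem.List.sorted_pairwise lt (fun x => x), ?_, ?_⟩
    · rw [List.pairwise_append]
      refine ⟨?_, PySem.List.sorted_pairwise gt (fun x => x), ?_⟩
      · rw [List.eq_replicate_of_mem hmemeq]
        exact List.pairwise_replicate.mpr (Or.inr le_rfl)
      · intro x hx y hy
        rw [hmemeq x hx]
        exact le_of_lt (hmemgt y hy)
    · intro x hx y hy
      have hxp := hmemlt x hx
      rcases List.mem_append.mp hy with h | h
      · rw [hmemeq y h]; exact le_of_lt hxp
      · exact le_of_lt (hxp.trans (hmemgt y h))

-- length of the three-way partition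
theorem partition_length (l : List Int) (p : Int) :
    l.length = (l.filter (fun x => decide (x < p))).length
      + ((l.filter (fun x => x == p)).length + (l.filter (fun x => decide (p < x))).length) := by
  have h := congrArg List.length (sorted_partition l p)
  simpa [PySem.List.length_sorted, List.length_append] using h

theorem eq_part_replicate (l : List Int) (p : Int) :
    l.filter (fun x => x == p) = List.replicate (l.filter (fun x => x == p)).length p := by
  apply List.eq_replicate_of_mem
  intro b hb
  simpa using (List.mem_filter.mp hb).2

theorem small_eq : ∀ (fuel : Nat) (l : List Int), l.length ≤ fuel → ∀ (t : Int),
    sumSmallestF fuel l t = ((PySem.List.sorted l (fun x => x)).take t.toNat).sum := by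
  intro fuel
  induction fuel with
  | zero =>
      intro l hl t
      have hnil : l = [] := List.eq_nil_of_length_eq_zero (by omega)
      subst hnil
      rw [(PySem.List.sorted_eq_nil_iff ([] : List Int) (fun x => x) false).mpr rfl]
      simp [sumSmallestF]
  | succ fuel ih =>
      intro l hl t
      simp only [sumSmallestF]
      by_cases h1 : t ≤ 0
      · rw [if_pos h1]
        simp [Int.toNat_of_nonpos h1]
      rw [if_neg h1]
      by_cases h2 : (l.length : Int) ≤ t
      · rw [if_pos h2]
        rw [List.take_of_length_le (by rw [PySem.List.length_sorted]; omega)]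
        exact ((PySem.List.sorted_perm l (fun x => x) false).sum_eq).symm
      rw [if_neg h2]
      set p := PySem.List.pyGetD l (PySem.Int.floordiv (l.length : Int) 2) 0 with hpdef
      set lt := l.filter (fun x => decide (x < p)) with hltdef
      set eq := l.filter (fun x => x == p) with heqdef
      set gt := l.filter (fun x => decide (p < x)) with hgtdef
      have hne : l ≠ [] := by intro hx; subst hx; simp at h2; omega
      have hp : p ∈ l := pivot_mem l hne
      have hlt_len : lt.length < l.length := filter_lt_len l p hp
      have hgt_len : gt.length < l.length := filter_gt_len l p hp
      have hplen := partition_length l p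
      have hpart := sorted_partition l p
      rw [← hltdef, ← heqdef, ← hgtdef] at hplen hpart
      have hAlen : (PySem.List.sorted lt (fun x => x)).length = lt.length :=
        PySem.List.length_sorted lt (fun x => x) false
      have hAsum : (PySem.List.sorted lt (fun x => x)).sum = lt.sum :=
        (PySem.List.sorted_perm lt (fun x => x) false).sum_eq
      by_cases h3 : t ≤ (lt.length : Int)
      · rw [if_pos h3, hpart, List.take_append_of_le_length (by omega)]
        exact ih lt (by omega) t
      rw [if_neg h3]
      by_cases h4 : t ≤ (lt.length : Int) + (eq.length : Int)
      · rw [if_pos h4, hpart, List.take_append,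
          List.take_of_length_le (by omega),
          List.take_append_of_le_length (by omega), hAlen]
        have heqr : eq = List.replicate eq.length p := by
          conv_lhs => rw [heqdef, eq_part_replicate l p]
        rw [heqr]
        show lt.sum + p * (t - (lt.length : Int)) =
          ((PySem.List.sorted lt (fun x => x))
            ++ List.take (t.toNat - lt.length) (List.replicate eq.length p)).sum
        rw [List.take_replicate, List.sum_append, hAsum, List.sum_replicate]
        have hmin : min (t.toNat - lt.length) eq.length = t.toNat - lt.length := by omega
        rw [hmin, nsmul_eq_mul]
        have : ((t.toNat - lt.length : Nat) : Int) = t - lt.length := by omega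
        rw [this]
        ring
      rw [if_neg h4, hpart, List.take_append,
        List.take_of_length_le (by omega),
        List.take_append, List.take_of_length_le (by omega), hAlen]
      rw [ih gt (by omega) (t - lt.length - eq.length)]
      have hidx : (t - (lt.length : Int) - (eq.length : Int)).toNat
          = t.toNat - lt.length - eq.length := by omega
      rw [hidx, List.sum_append, List.sum_append, hAsum]
      ring

theorem large_eq : ∀ (fuel : Nat) (l : List Int), l.length ≤ fuel → ∀ (t : Int),
    sumLargestF fuel l t = ((PySem.List.sorted l (fun x => x)).drop (l.length - t.toNat)).sum := by
  intro fuel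
  induction fuel with
  | zero =>
      intro l hl t
      have hnil : l = [] := List.eq_nil_of_length_eq_zero (by omega)
      subst hnil
      rw [(PySem.List.sorted_eq_nil_iff ([] : List Int) (fun x => x) false).mpr rfl]
      simp [sumLargestF]
  | succ fuel ih =>
      intro l hl t
      simp only [sumLargestF]
      by_cases h1 : t ≤ 0
      · rw [if_pos h1]
        rw [Int.toNat_of_nonpos h1, Nat.sub_zero,
          List.drop_of_length_le (le_of_eq (PySem.List.length_sorted l (fun x => x) false))]
        simp
      rw [if_neg h1]
      by_cases h2 : (l.length : Int) ≤ t
      · rw [if_pos h2]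
        have : l.length - t.toNat = 0 := by omega
        rw [this, List.drop_zero]
        exact ((PySem.List.sorted_perm l (fun x => x) false).sum_eq).symm
      rw [if_neg h2]
      set p := PySem.List.pyGetD l (PySem.Int.floordiv (l.length : Int) 2) 0 with hpdef
      set lt := l.filter (fun x => decide (x < p)) with hltdef
      set eq := l.filter (fun x => x == p) with heqdef
      set gt := l.filter (fun x => decide (p < x)) with hgtdef
      have hne : l ≠ [] := by intro hx; subst hx; simp at h2; omega
      have hp : p ∈ l := pivot_mem l hne
      have hlt_len : lt.length < l.length := filter_lt_len l p hp
      have hgt_len : gt.length < l.length := filter_gt_len l p hp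
      have hplen := partition_length l p
      have hpart := sorted_partition l p
      rw [← hltdef, ← heqdef, ← hgtdef] at hplen hpart
      have hAlen : (PySem.List.sorted lt (fun x => x)).length = lt.length :=
        PySem.List.length_sorted lt (fun x => x) false
      have hAsum : (PySem.List.sorted lt (fun x => x)).sum = lt.sum :=
        (PySem.List.sorted_perm lt (fun x => x) false).sum_eq
      have hCsum : (PySem.List.sorted gt (fun x => x)).sum = gt.sum :=
        (PySem.List.sorted_perm gt (fun x => x) false).sum_eq
      have heqr : eq = List.replicate eq.length p := by
        conv_lhs => rw [heqdef, eq_part_replicate l p]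
      by_cases h3 : t ≤ (gt.length : Int)
      · rw [if_pos h3, hpart, List.drop_append, List.drop_append,
          List.drop_of_length_le (by omega),
          List.drop_of_length_le (by rw [hAlen]; omega), hAlen]
        rw [ih gt (by omega) t]
        have hidx : l.length - t.toNat - lt.length - eq.length = gt.length - t.toNat := by omega
        rw [hidx]
        simp
      rw [if_neg h3]
      by_cases h4 : t ≤ (gt.length : Int) + (eq.length : Int)
      · rw [if_pos h4, hpart, List.drop_append, List.drop_append,
          List.drop_of_length_le (by rw [hAlen]; omega), hAlen]
        have hC0 : l.length - t.toNat - lt.length - eq.length = 0 := by omega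
        rw [hC0, List.drop_zero]
        rw [heqr, List.drop_replicate]
        rw [List.sum_append, List.sum_append, List.sum_nil, List.sum_replicate, hCsum,
          nsmul_eq_mul]
        have : ((eq.length - (l.length - t.toNat - lt.length) : Nat) : Int) = t - gt.length := by
          omega
        rw [this]
        ring
      rw [if_neg h4, hpart, List.drop_append,
        List.drop_append, hAlen]
      have hB0 : l.length - t.toNat - lt.length = 0 := by omega
      rw [hB0, Nat.zero_sub, List.drop_zero, List.drop_zero]
      rw [ih lt (by omega) (t - gt.length - eq.length)]
      have hidx : lt.length - (t - (gt.length : Int) - (eq.length : Int)).toNat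
          = l.length - t.toNat := by omega
      rw [hidx, List.sum_append, List.sum_append, hCsum]
      ring

theorem alt_eq (w : List Int) (k : Int) :
    putMarbles_alt w k =
      ((PySem.List.sorted ((w.zip (w.drop 1)).map (fun p => p.1 + p.2)) (fun x => x)).drop
          ((PySem.List.sorted ((w.zip (w.drop 1)).map (fun p => p.1 + p.2)) (fun x => x)).length
            - (min (k - 1) (((PySem.List.sorted ((w.zip (w.drop 1)).map (fun p => p.1 + p.2)) (fun x => x)).length : Nat) : Int)).toNat)).sum
        - ((PySem.List.sorted ((w.zip (w.drop 1)).map (fun p => p.1 + p.2)) (fun x => x)).take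
            ((min (k - 1) (((PySem.List.sorted ((w.zip (w.drop 1)).map (fun p => p.1 + p.2)) (fun x => x)).length : Nat) : Int)).toNat)).sum := by
  simp only [putMarbles_alt]
  set pairs := (w.zip (w.drop 1)).map (fun p => p.1 + p.2) with hp
  have hlen : (PySem.List.sorted pairs (fun x => x)).length = pairs.length :=
    PySem.List.length_sorted pairs (fun x => x) false
  rw [hlen]
  set m : Int := min (k - 1) ((pairs.length : Nat) : Int) with hm
  by_cases h : m ≤ 0
  · rw [if_pos h]
    have h0 : m.toNat = 0 := by omega
    rw [h0, Nat.sub_zero, List.take_zero, List.sum_nil, sub_zero,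
      List.drop_of_length_le (le_of_eq hlen), List.sum_nil]
  · rw [if_neg h]
    unfold sumLargest sumSmallest
    rw [small_eq pairs.length pairs le_rfl m, large_eq pairs.length pairs le_rfl m]

theorem main_eq (w : List Int) (k : Int) (hpre : Pre_putMarbles w k) :
    putMarbles w k = putMarbles_alt w k := by
  rcases hpre with ⟨hk, hne⟩ | ⟨hk0, hwne, hsmall⟩ | ⟨hwnil, hk0⟩
  case inr.inr =>  -- w = [], k = 0: both sides are literally 0
    subst hwnil; subst hk0; decide
  case inr.inl =>  -- k ≤ 0 with at most one adjacent pair reachable: both slices are empty, A = 0 = B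
    rw [alt_eq]
    set s := PySem.List.sorted ((w.zip (w.drop 1)).map (fun p => p.1 + p.2)) (fun x => x) with hs
    have hlen : s.length = w.length - 1 := by
      rw [hs, PySem.List.length_sorted]
      simp [List.length_zip]
    set m : Int := min (k - 1) ((s.length : Nat) : Int) with hm
    have hw1 : 1 ≤ w.length := List.length_pos_of_ne_nil hwne
    simp only [putMarbles]
    have hcond : ¬ (((w.length : Int) == k || k == 1) = true) := by
      intro hc
      rcases Bool.or_eq_true_iff.mp hc with h | h
      · have : (w.length : Int) = k := by simpa using beq_iff_eq.mp h
        omega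
      · have : k = 1 := by simpa using beq_iff_eq.mp h
        omega
    rw [if_neg hcond]
    simp only [pairs_eq w, ← hs]
    have hneg2 : k - 1 = -((((1 - k).toNat : Nat)) : Int) := by omega
    rw [hneg2, PySem.List.slice_to_neg_natCast s (1 - k).toNat (by omega),
      PySem.List.slice_from s (by omega : (0 : Int) ≤ -(-((((1 - k).toNat : Nat)) : Int)))]
    have htake0 : s.length - (1 - k).toNat = 0 := by omega
    rw [htake0, List.take_zero, List.sum_nil,
      List.drop_of_length_le (by omega :
        s.length ≤ (-(-((((1 - k).toNat : Nat)) : Int))).toNat), List.sum_nil]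
    have hmt : m.toNat = 0 := by omega
    rw [hmt, Nat.sub_zero, List.take_zero, List.sum_nil,
      List.drop_of_length_le (le_refl _), List.sum_nil]
    ring
  rw [alt_eq]
  set s := PySem.List.sorted ((w.zip (w.drop 1)).map (fun p => p.1 + p.2)) (fun x => x) with hs
  have hlen : s.length = w.length - 1 := by
    rw [hs, PySem.List.length_sorted]
    simp [List.length_zip]
  set m : Int := min (k - 1) ((s.length : Nat) : Int) with hm
  simp only [putMarbles]
  by_cases h1 : ((w.length : Int) == k || k == 1) = true
  · rw [if_pos h1]
    rcases Bool.or_eq_true_iff.mp h1 with h | h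
    · -- n == k : all of s is taken on both sides
      have hn : (w.length : Int) = k := by simpa using beq_iff_eq.mp h
      have hw1 : 1 ≤ w.length := by omega
      have hmt : m.toNat = s.length := by omega
      rw [hmt, List.take_of_length_le (le_refl _), Nat.sub_self, List.drop_zero, sub_self]
    · -- k == 1 : nothing is taken on either side
      have hk1 : k = 1 := by simpa using beq_iff_eq.mp h
      have hmt : m.toNat = 0 := by omega
      rw [hmt, Nat.sub_zero, List.take_zero,
        List.drop_of_length_le (le_refl _), List.sum_nil, sub_zero]
  · -- main branch
    rw [if_neg h1]
    simp only [pairs_eq w, ← hs]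
    have hkk : 2 ≤ k := by
      rcases Nat.lt_or_ge 0 w.length with hw | hw
      · have : k ≠ 1 := by
          intro hc; apply h1; simp [hc]
        omega
      · have hwe : w = [] := by cases w <;> simp_all
        exact absurd (by simp [hne hwe]) h1
    have hneg : -(k - 1) = -((((k - 1).toNat : Nat)) : Int) := by omega
    rw [PySem.List.slice_to s (by omega : (0 : Int) ≤ k - 1),
      PySem.List.slice_some_none, hneg,
      PySem.List.clampIdx_neg_natCast s.length (k - 1).toNat (by omega)]
    by_cases hc : (k - 1).toNat ≤ s.length
    · have e1 : m.toNat = (k - 1).toNat := by omega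
      rw [e1]; ring
    · have e1 : m.toNat = s.length := by omega
      have e2 : s.length - (k - 1).toNat = 0 := by omega
      rw [e1, e2, Nat.sub_self, List.take_of_length_le (le_refl _),
        List.take_of_length_le (by omega)]
      ring

-- ===== VERDICT (by name: the statement is the Claim_ definition above) =====
theorem putMarbles_spec : Claim_equal_putMarbles := by
  intro w k _ hpre
  unfold Spec_putMarbles
  exact main_eq w k hpre
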